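-- pv_equiv track=rewrite | github.com/yagocdj/ED | recursion/recursionClass.py | compareStr
-- ===== SOURCE A (Python) =====
-- def compareStr(string_one: str, string_two: str) -> int:
--     if len(string_one) == len(string_two):
--         return 0
--     if len(string_one) == 0:
--         return -1
--     if len(string_two) == 0:
--         return 1
--     return compareStr(string_one[1:], string_two[1:])
-- ===== SOURCE B (Python) =====
-- def compareStr(string_one: str, string_two: str) -> int:
--     # iterative: strip one char from each string until one empties
--     while string_one and string_two:
--         string_one = string_one[1:]
--         string_two = string_two[1:]
--     if not string_one and not string_two:
--         return 0
--     return -1 if not string_one else 1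
-- ===== Notes on version B (the rewrite author's own statement) =====
-- stated objective: alternative
-- what changed: Replaces A's three-test recursion with an explicit iterative loop that strips one character from each string per step until one empties, then classifies the leftovers.
import Mathlib
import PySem

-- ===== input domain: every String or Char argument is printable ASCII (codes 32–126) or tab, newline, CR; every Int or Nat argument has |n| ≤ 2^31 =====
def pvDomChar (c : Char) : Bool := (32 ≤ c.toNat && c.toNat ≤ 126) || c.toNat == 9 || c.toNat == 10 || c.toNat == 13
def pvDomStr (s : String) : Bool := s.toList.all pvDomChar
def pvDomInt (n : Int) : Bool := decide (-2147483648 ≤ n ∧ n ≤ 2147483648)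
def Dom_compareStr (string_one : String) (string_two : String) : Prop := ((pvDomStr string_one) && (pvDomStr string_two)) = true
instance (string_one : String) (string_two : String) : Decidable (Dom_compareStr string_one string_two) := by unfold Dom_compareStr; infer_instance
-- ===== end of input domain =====

-- B replaces A's recursion with an explicit strip-both iterative loop; return value only.
-- ===== PORT A =====
def compareStrRec : List Char → List Char → Int
  | l1, l2 =>
    if l1.length = l2.length then 0
    else if l1.length = 0 then -1
    else if l2.length = 0 then 1
    else compareStrRec l1.tail l2.tail
termination_by l1 _ => l1.length
decreasing_by
  rename_i h1 h2 _
  cases l1 with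
  | nil => simp at h2
  | cons a as => simp [List.tail]

def compareStr (string_one : String) (string_two : String) : Int :=
  compareStrRec string_one.toList string_two.toList

-- ===== PORT B =====
-- the while loop: strip one char from each until one is empty
def stripBoth : List Char → List Char → List Char × List Char
  | _ :: as, _ :: bs => stripBoth as bs
  | l1, l2 => (l1, l2)

def compareStr_alt (string_one : String) (string_two : String) : Int :=
  let r := stripBoth string_one.toList string_two.toList
  if r.1 = [] ∧ r.2 = [] then 0
  else if r.1 = [] then -1
  else 1

-- ===== PRECONDITION & SPEC =====
def Spec_compareStr (string_one : String) (string_two : String) (out : Int) : Prop := out = compareStr_alt string_one string_two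
instance (string_one : String) (string_two : String) (out : Int) : Decidable (Spec_compareStr string_one string_two out) := by unfold Spec_compareStr; infer_instance

-- ===== CLAIM (what is proved, stated in full; the proofs are below) =====
def Claim_equal_compareStr : Prop := ∀ (string_one : String) (string_two : String), Dom_compareStr string_one string_two → Spec_compareStr string_one string_two (compareStr string_one string_two)

-- ===== LEMMAS AND PROOFS =====

-- ===== VERDICT (by name: the statement is the Claim_ definition above) =====
theorem compareStrRec_eq (l1 : List Char) (l2 : List Char) :
    compareStrRec l1 l2 =
      (if (stripBoth l1 l2).1 = [] ∧ (stripBoth l1 l2).2 = [] then 0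
       else if (stripBoth l1 l2).1 = [] then -1 else 1) := by
  induction l1 generalizing l2 with
  | nil => cases l2 <;> simp [compareStrRec, stripBoth]
  | cons a as ih =>
    cases l2 with
    | nil => simp [compareStrRec, stripBoth]
    | cons b bs =>
      rw [compareStrRec, stripBoth]
      by_cases h : (a :: as).length = (b :: bs).length
      · have h' : as.length = bs.length := by simpa using h
        rw [if_pos h, ← ih bs, compareStrRec, if_pos h']
      · have h' : as.length ≠ bs.length := by simpa using h
        rw [if_neg h]
        simp only [List.length_cons, List.tail_cons]
        rw [if_neg (by omega), if_neg (by omega), ih bs]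

theorem compareStr_spec : Claim_equal_compareStr := by
  intro s1 s2 _
  unfold Spec_compareStr compareStr compareStr_alt
  exact compareStrRec_eq s1.toList s2.toList
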